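/- GENERATED by farm/mkstatement.py from design/units.tsv (unit `decode_all.2`) and the assertions of Vorbis/Spec/DecodeAll.lean — do not edit.
   THE STATEMENT of the proof unit `decode_all.2`: segment 2 of `decode_all` (28 instructions; entries 0x10357b;
   exits 0x1035c5,0x10351d; ranges 0x10357b-0x1035c0 + 0x103609-0x10363b)
   takes each of its entry assertions to one of its exit assertions (`Vorbis.Spec.decode_all.Seg2`), given the contracts of its callees.
   What the names mean: Vorbis/Spec/Basic.lean (the shared hypotheses), Vorbis/Spec/DecodeAll.lean (the assertions). The theorem to prove:
   `theorem decode_all_2_ok : Vorbis.Spec.decode_all_2.Statement`. -/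
import Vorbis.Spec.DecodeAll
import Vorbis.Spec.Top
namespace Vorbis.Spec.decode_all_2
open X86 X86.User Asan

/-- The statement of unit `decode_all.2`. -/
def Statement : Prop :=
  ∀ (Lay : Layout) (_hLay : Lay.hi = 0x1000000) (μ : Microarch) (_hμ : UserX.MicroOK μ) (u₀ : State)
    (_hcode : HasCodeNat Lay u₀ Vorbis.L.decode_all.entry Vorbis.Code.code_decode_all.nat Vorbis.L.decode_all.size)
    (_h_asan_load4_noabort : Asan.SmallCheck Lay μ Vorbis.WayInv (Vorbis.CodeOK u₀) [.rax, .rcx, .rdx] 4 Vorbis.L.__asan_load4_noabort.entry)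
    (_h_put_header : ∀ (others : List Obj) (frames : List (Nat × FrameLayout)), Calls Lay μ Vorbis.WayInv (Vorbis.conv u₀) Vorbis.L.put_header.entry (Vorbis.Spec.put_header.spec others frames)),
    Vorbis.Spec.decode_all.Seg2 Lay μ u₀

end Vorbis.Spec.decode_all_2
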